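-- pv_equiv track=rewrite | github.com/justinmclean/IncubatorMCP | ipmc/analysis.py | expected_reporting_count
-- ===== SOURCE A (Python) =====
-- def expected_reporting_count(months_in_incubation: int | None, window_months: int) -> int | None:
--     """Return expected Incubator reports in a rolling window from ASF podling cadence."""
--     if months_in_incubation is None:
--         return None
--     if months_in_incubation <= 0:
--         return 0
--
--     window_start = max(0, months_in_incubation - window_months)
--     due_months = [month for month in range(1, months_in_incubation + 1) if month <= 3 or (month > 3 and month % 3 == 0)]
--     return sum(1 for month in due_months if window_start < month <= months_in_incubation)
-- ===== SOURCE B (Python) =====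
-- def expected_reporting_count(months_in_incubation, window_months):
--     """Closed-form count of due report months in the rolling window (O(1))."""
--     if months_in_incubation is None:
--         return None
--     m = months_in_incubation
--     if m <= 0:
--         return 0
--
--     def due_upto(x):
--         # number of due months in 1..x for x >= 0: months 1..3, then every multiple of 3
--         return min(x, 3) + max(0, x // 3 - 1)
--
--     start = min(m, max(0, m - window_months))
--     return due_upto(m) - due_upto(start)
-- ===== Notes on version B (the rewrite author's own statement) =====
-- stated objective: faster
-- what changed: Replaced A's O(m) scan over range(1, m+1) building a list of due months and summing indicators with a closed-form count due_upto(x) = min(x,3) + max(0, x//3 - 1) evaluated at the window endpoints.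
import Mathlib
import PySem

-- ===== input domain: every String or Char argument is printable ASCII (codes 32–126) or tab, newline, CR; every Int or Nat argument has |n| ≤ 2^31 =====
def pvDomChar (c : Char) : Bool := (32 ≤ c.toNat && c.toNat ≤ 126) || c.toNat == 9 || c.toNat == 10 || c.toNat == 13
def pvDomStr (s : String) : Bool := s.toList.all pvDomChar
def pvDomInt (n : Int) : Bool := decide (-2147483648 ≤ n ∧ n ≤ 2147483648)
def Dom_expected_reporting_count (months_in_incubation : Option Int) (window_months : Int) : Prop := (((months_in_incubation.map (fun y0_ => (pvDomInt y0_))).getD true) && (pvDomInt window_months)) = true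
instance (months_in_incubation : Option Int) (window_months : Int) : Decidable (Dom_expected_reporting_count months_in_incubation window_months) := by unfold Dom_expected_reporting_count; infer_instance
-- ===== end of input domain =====

-- B replaces A's O(m) scan over range(1, m+1) by a closed-form O(1) count of due months.

-- ===== PORT A =====
-- the list-comprehension predicate of A, verbatim
def pvDueB (month : Int) : Bool :=
  decide (month ≤ 3) || (decide (month > 3) && decide (PySem.Int.mod month 3 = 0))

def expected_reporting_count (months_in_incubation : Option Int) (window_months : Int) : Option Int :=
  match months_in_incubation with
  | none => none
  | some m =>
    if m ≤ 0 then some 0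
    else
      let window_start := max 0 (m - window_months)
      let due_months := (PySem.List.pyRange 1 (m + 1) 1).filter pvDueB
      some (due_months.foldl
        (fun acc month => if window_start < month ∧ month ≤ m then acc + 1 else acc) 0)

-- ===== PORT B =====
def pvDueUpto (x : Int) : Int := min x 3 + max 0 (PySem.Int.floordiv x 3 - 1)

def expected_reporting_count_alt (months_in_incubation : Option Int) (window_months : Int) : Option Int :=
  match months_in_incubation with
  | none => none
  | some m =>
    if m ≤ 0 then some 0
    else
      let start := min m (max 0 (m - window_months))
      some (pvDueUpto m - pvDueUpto start)

-- ===== PRECONDITION & SPEC =====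
def Spec_expected_reporting_count (months_in_incubation : Option Int) (window_months : Int) (out : Option Int) : Prop := out = expected_reporting_count_alt months_in_incubation window_months
instance (months_in_incubation : Option Int) (window_months : Int) (out : Option Int) : Decidable (Spec_expected_reporting_count months_in_incubation window_months out) := by unfold Spec_expected_reporting_count; infer_instance

-- ===== CLAIM (what is proved, stated in full; the proofs are below) =====
def Claim_equal_expected_reporting_count : Prop := ∀ (months_in_incubation : Option Int) (window_months : Int), Dom_expected_reporting_count months_in_incubation window_months → Spec_expected_reporting_count months_in_incubation window_months (expected_reporting_count months_in_incubation window_months)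

-- ===== LEMMAS AND PROOFS =====

-- the conditional-add fold is a filter length
theorem pv_foldl_if_count (p : Int → Prop) [DecidablePred p] (l : List Int) (a : Int) :
    l.foldl (fun acc x => if p x then acc + 1 else acc) a
      = a + ((l.filter (fun x => decide (p x))).length : Int) := by
  induction l generalizing a with
  | nil => simp
  | cons x xs ih =>
    by_cases h : p x <;> simp [List.foldl_cons, ih, h] <;> omega

-- one step of the closed form: pvDueUpto rises by 1 exactly at due months
theorem pvDueUpto_succ (n : ℕ) :
    pvDueUpto ((n : Int) + 1)
      = pvDueUpto n + (if pvDueB ((n : Int) + 1) then 1 else 0) := by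
  have h3 : (0 : Int) < 3 := by norm_num
  simp only [pvDueUpto, pvDueB,
    PySem.Int.floordiv_eq_ediv_of_pos h3, PySem.Int.mod_eq_emod_of_pos h3]
  split_ifs with h <;> simp_all <;> omega

-- main invariant: counting due months above lo in range(1, n+1), closed form
theorem pv_count_due (n : ℕ) (lo : Int) (hlo : 0 ≤ lo) :
    (((PySem.List.pyRange 1 ((n : Int) + 1) 1).filter
        (fun month => pvDueB month && decide (lo < month))).length : Int)
      = pvDueUpto n - pvDueUpto (min n lo) := by
  induction n with
  | zero =>
    push_cast
    have h0 : PySem.List.pyRange 1 (1 : Int) 1 = [] := by decide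
    rw [h0]
    have hmin : min (0 : Int) lo = 0 := by omega
    rw [hmin]
    simp
  | succ n ih =>
    have hsplit : PySem.List.pyRange 1 (((n : ℕ) + 1 : ℕ) + 1 : Int) 1
        = PySem.List.pyRange 1 ((n : Int) + 1) 1 ++ [(n : Int) + 1] := by
      push_cast
      exact PySem.List.pyRange_one_succ_right (a := 1) (b := (n : Int) + 1) (by omega)
    rw [hsplit, List.filter_append, List.length_append]
    push_cast
    rw [ih]
    have hstep := pvDueUpto_succ n
    by_cases hle : lo ≤ (n : Int)
    · have h1 : min ((n : ℕ) : Int) lo = lo := by omega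
      have h2 : min ((n : Int) + 1) lo = lo := by omega
      rw [h1, h2]
      by_cases hd : pvDueB ((n : Int) + 1)
      · have : lo < (n : Int) + 1 := by omega
        simp only [List.filter, hd, this, decide_true, Bool.and_true]
        push_cast [hstep, hd]
        simp
        omega
      · simp only [List.filter, hd, Bool.false_and]
        push_cast [hstep, hd]
        simp
    · have h1 : min ((n : ℕ) : Int) lo = (n : Int) := by omega
      have h2 : min ((n : Int) + 1) lo = (n : Int) + 1 := by omega
      have hnot : ¬ (lo < (n : Int) + 1) := by omega
      rw [h1, h2]
      simp only [List.filter, hnot, decide_false, Bool.and_false]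
      push_cast [hstep]
      split_ifs <;> simp

-- ===== VERDICT (by name: the statement is the Claim_ definition above) =====
theorem expected_reporting_count_spec : Claim_equal_expected_reporting_count := by
  intro mi w _
  unfold Spec_expected_reporting_count expected_reporting_count expected_reporting_count_alt
  match mi with
  | none => rfl
  | some m =>
    by_cases hm : m ≤ 0
    · simp [hm]
    · simp only [hm, if_false]
      set lo := max 0 (m - w) with hlo
      have hlo0 : 0 ≤ lo := le_max_left _ _
      -- rewrite A's fold as a filtered count with the merged predicate
      rw [pv_foldl_if_count (fun month => lo < month ∧ month ≤ m)]
      rw [List.filter_filter]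
      have hcong : (PySem.List.pyRange 1 (m + 1) 1).filter
            (fun x => decide (lo < x ∧ x ≤ m) && pvDueB x)
          = (PySem.List.pyRange 1 (m + 1) 1).filter
            (fun x => pvDueB x && decide (lo < x)) := by
        apply List.filter_congr
        intro x hx
        have hxm : x ≤ m := by
          have := (PySem.List.mem_pyRange_one.mp hx).2
          omega
        by_cases h : lo < x <;> simp [h, hxm, Bool.and_comm]
      rw [hcong]
      have hn : ((m.toNat : ℕ) : Int) = m := by omega
      have := pv_count_due m.toNat lo hlo0
      rw [hn] at this
      rw [this]
      have hmin : min m lo = min m (max 0 (m - w)) := by rw [hlo]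
      rw [hmin]
      simp
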